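-- pv_equiv track=rewrite | github.com/philana-williams/advent-of-code | 2024/advent_of_code_day4_part2.py | aMatrixBuilder
-- ===== SOURCE A (Python) =====
-- def aLocator(lineList):
--     aLocationList = []
--
--     for lineIndex in range(len(lineList)):
--         line = lineList[lineIndex]
--         for characterIndex in range(len(line)):
--             character = line[characterIndex]
--             if character.lower() == "a":
--                 aLocationList.append((lineIndex, characterIndex))
--     return aLocationList
--
-- def aMatrixBuilder(lineList):
--     aLocationList = aLocator(lineList)
--     aMatrix = []
--
--     for lineNumber, characterIndex in aLocationList:
--         upperLineNumber = lineNumber - 1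
--         lowerLineNumber = lineNumber + 1
--         rightAdjacentIndex = characterIndex + 1
--         leftAdjacentIndex = characterIndex - 1
--
--         # make sure we don't run into index errors
--         if (upperLineNumber != -1 and leftAdjacentIndex != -1) and (
--                 lowerLineNumber < len(lineList) and rightAdjacentIndex < len(lineList[0])):
--             aGrid = []
--             upperStr = lineList[upperLineNumber][leftAdjacentIndex:rightAdjacentIndex + 1]
--             aGrid.append(upperStr)
--
--             middleStr = lineList[lineNumber][leftAdjacentIndex:rightAdjacentIndex + 1]
--             aGrid.append(middleStr)
--
--             lowerStr = lineList[lowerLineNumber][leftAdjacentIndex:rightAdjacentIndex + 1]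
--             aGrid.append(lowerStr)
--
--             aMatrix.append(aGrid)
--
--     return aMatrix
-- ===== SOURCE B (Python) =====
-- def aMatrixBuilder(lineList):
--     # Single pass: scan every character once and build the 3x3 grid on the spot,
--     # instead of first collecting all 'a' locations into an intermediate list.
--     aMatrix = []
--     for lineIndex, line in enumerate(lineList):
--         for characterIndex, character in enumerate(line):
--             if (character.lower() == "a"
--                     and lineIndex != 0 and characterIndex != 0
--                     and lineIndex + 1 < len(lineList)
--                     and characterIndex + 1 < len(lineList[0])):
--                 aMatrix.append([
--                     lineList[lineIndex - 1][characterIndex - 1:characterIndex + 2],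
--                     line[characterIndex - 1:characterIndex + 2],
--                     lineList[lineIndex + 1][characterIndex - 1:characterIndex + 2],
--                 ])
--     return aMatrix
-- ===== Notes on version B (the rewrite author's own statement) =====
-- stated objective: simpler
-- what changed: B fuses A's two phases into one pass: instead of first materialising the full list of 'a' locations with the aLocator helper and then looping over that list, B scans the grid once with enumerate and builds each 3x3 grid on the spot.
import Mathlib
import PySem

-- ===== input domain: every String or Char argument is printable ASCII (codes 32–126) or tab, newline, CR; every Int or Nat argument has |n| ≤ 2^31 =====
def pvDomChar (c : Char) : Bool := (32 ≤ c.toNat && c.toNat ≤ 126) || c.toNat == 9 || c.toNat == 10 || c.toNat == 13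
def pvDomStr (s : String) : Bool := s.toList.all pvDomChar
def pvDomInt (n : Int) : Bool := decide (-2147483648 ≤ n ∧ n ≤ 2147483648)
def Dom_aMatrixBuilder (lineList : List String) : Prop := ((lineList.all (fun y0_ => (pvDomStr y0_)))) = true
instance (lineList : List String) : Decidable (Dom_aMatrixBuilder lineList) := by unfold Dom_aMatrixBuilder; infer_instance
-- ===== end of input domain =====

-- B replaces A's two-phase locate-then-build (helper aLocator + intermediate location list)
-- by a single fused enumerate pass that builds each 3x3 grid on the spot (objective: simpler).

-- ===== PORT A =====
-- aLocator: A's helper, collecting the (lineIndex, characterIndex) of every 'a'/'A'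
def aLocator (lineList : List String) : List (Int × Int) :=
  (PySem.List.pyRange 0 (lineList.length : Int) 1).foldl (fun aLocationList lineIndex =>
    let line := PySem.List.pyGetD lineList lineIndex ""
    (PySem.List.pyRange 0 (PySem.Str.len line) 1).foldl (fun acc characterIndex =>
      let character := (PySem.Str.pyGet? line characterIndex).getD ' '
      if PySem.Chars.lowerChar character == 'a' then acc ++ [(lineIndex, characterIndex)]
      else acc) aLocationList) []

def aMatrixBuilder (lineList : List String) : List (List String) :=
  (aLocator lineList).foldl (fun aMatrix p =>
    let lineNumber := p.1
    let characterIndex := p.2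
    let upperLineNumber := lineNumber - 1
    let lowerLineNumber := lineNumber + 1
    let rightAdjacentIndex := characterIndex + 1
    let leftAdjacentIndex := characterIndex - 1
    if (upperLineNumber ≠ -1 ∧ leftAdjacentIndex ≠ -1) ∧
       (lowerLineNumber < (lineList.length : Int) ∧
        rightAdjacentIndex < PySem.Str.len (PySem.List.pyGetD lineList 0 "")) then
      let upperStr := PySem.Str.slice (PySem.List.pyGetD lineList upperLineNumber "")
        (some leftAdjacentIndex) (some (rightAdjacentIndex + 1))
      let middleStr := PySem.Str.slice (PySem.List.pyGetD lineList lineNumber "")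
        (some leftAdjacentIndex) (some (rightAdjacentIndex + 1))
      let lowerStr := PySem.Str.slice (PySem.List.pyGetD lineList lowerLineNumber "")
        (some leftAdjacentIndex) (some (rightAdjacentIndex + 1))
      aMatrix ++ [[upperStr, middleStr, lowerStr]]
    else aMatrix) []

-- ===== PORT B =====
-- B: one fused pass over enumerate(lineList) / enumerate(line), building each grid on the spot
def aMatrixBuilder_alt (lineList : List String) : List (List String) :=
  (PySem.List.enumerate lineList 0).foldl (fun aMatrix il =>
    let lineIndex := il.1
    let line := il.2
    (PySem.List.enumerate line.toList 0).foldl (fun acc jc =>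
      let characterIndex := jc.1
      let character := jc.2
      if PySem.Chars.lowerChar character == 'a' ∧ lineIndex ≠ 0 ∧ characterIndex ≠ 0 ∧
         lineIndex + 1 < (lineList.length : Int) ∧
         characterIndex + 1 < PySem.Str.len (PySem.List.pyGetD lineList 0 "") then
        acc ++ [[PySem.Str.slice (PySem.List.pyGetD lineList (lineIndex - 1) "")
                   (some (characterIndex - 1)) (some (characterIndex + 2)),
                 PySem.Str.slice line (some (characterIndex - 1)) (some (characterIndex + 2)),
                 PySem.Str.slice (PySem.List.pyGetD lineList (lineIndex + 1) "")
                   (some (characterIndex - 1)) (some (characterIndex + 2))]]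
      else acc) aMatrix) []

-- ===== PRECONDITION & SPEC =====
def Spec_aMatrixBuilder (lineList : List String) (out : List (List String)) : Prop := out = aMatrixBuilder_alt lineList
instance (lineList : List String) (out : List (List String)) : Decidable (Spec_aMatrixBuilder lineList out) := by unfold Spec_aMatrixBuilder; infer_instance

-- ===== CLAIM (what is proved, stated in full; the proofs are below) =====
def Claim_equal_aMatrixBuilder : Prop := ∀ (lineList : List String), Dom_aMatrixBuilder lineList → Spec_aMatrixBuilder lineList (aMatrixBuilder lineList)

-- ===== LEMMAS AND PROOFS =====

-- canonical form both ports are reduced to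
def pvGrid (lineList : List String) (i j : Int) : List String :=
  [PySem.Str.slice (PySem.List.pyGetD lineList (i - 1) "") (some (j - 1)) (some (j + 2)),
   PySem.Str.slice (PySem.List.pyGetD lineList i "") (some (j - 1)) (some (j + 2)),
   PySem.Str.slice (PySem.List.pyGetD lineList (i + 1) "") (some (j - 1)) (some (j + 2))]

def pvCond (lineList : List String) (i j : Int) : Bool :=
  (PySem.Chars.lowerChar (PySem.List.pyGetD (PySem.List.pyGetD lineList i "").toList j ' ') == 'a')
    && decide (i ≠ 0) && decide (j ≠ 0) && decide (i + 1 < (lineList.length : Int))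
    && decide (j + 1 < PySem.Str.len (PySem.List.pyGetD lineList 0 ""))

def pvCanon (lineList : List String) : List (List String) :=
  (PySem.List.pyRange 0 (lineList.length : Int) 1).flatMap (fun i =>
    ((PySem.List.pyRange 0 (PySem.Str.len (PySem.List.pyGetD lineList i "")) 1).filter
        (pvCond lineList i)).map (pvGrid lineList i))

lemma b_norm (lineList : List String) : aMatrixBuilder_alt lineList = pvCanon lineList := by
  unfold aMatrixBuilder_alt pvCanon
  simp only [PySem.List.foldl_ite_eq_foldl_filter, PySem.List.foldl_append_singleton_eq_map,
    PySem.List.foldl_append_eq_flatMap, List.nil_append]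
  rw [PySem.List.enumerate_eq_map_pyRange lineList "", List.flatMap_map]
  simp only [PySem.List.enumerate_eq_map_pyRange (d := ' '), List.filter_map, List.map_map]
  congr 1
  funext i
  simp only [Function.comp_def]
  congr 1
  simp only [PySem.Str.len_eq, PySem.List.len]
  congr 1
  funext j
  simp [pvCond, Bool.and_assoc, PySem.Str.len_eq, Bool.beq_eq_decide_eq]

lemma pv_pyGet?_getD {α : Type} (xs : List α) (j : Int) (d : α) :
    (PySem.List.pyGet? xs j).getD d = PySem.List.pyGetD xs j d := rfl

lemma a_norm (lineList : List String) : aMatrixBuilder lineList = pvCanon lineList := by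
  unfold aMatrixBuilder aLocator pvCanon
  simp only [PySem.List.foldl_append_eq_flatMap,
    PySem.List.foldl_ite_eq_foldl_filter, List.nil_append]
  simp only [← List.map_eq_flatMap, List.filter_flatMap, List.map_flatMap,
    List.filter_map, List.map_map, List.filter_filter]
  congr 1
  funext i
  congr 1
  · funext j
    simp only [Function.comp_def, pvGrid, add_assoc]
    norm_num
  · congr 1
    funext j
    simp [pvCond, Bool.beq_eq_decide_eq,
      Bool.and_assoc, Bool.and_comm, Bool.and_left_comm, pv_pyGet?_getD]

-- ===== VERDICT (by name: the statement is the Claim_ definition above) =====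
theorem aMatrixBuilder_spec : Claim_equal_aMatrixBuilder := by
  intro lineList _
  unfold Spec_aMatrixBuilder
  rw [a_norm, b_norm]
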